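-- pv_equiv track=rewrite | github.com/CommanderCRM/AudioApp | audiometrics/metrics.py | edr
-- ===== SOURCE A (Python) =====
-- def edr(s, t, k):
--     """Расстояние EDR"""
--     n = len(s)
--     m = len(t)
--     dp = [[0 for j in range(m+1)] for i in range(n+1)]
--
--     for i in range(n+1):
--         for j in range(m+1):
--             if i == 0:
--                 dp[i][j] = j
--             elif j == 0:
--                 dp[i][j] = i
--             else:
--                 if abs(s[i-1] - t[j-1]) <= k:
--                     dp[i][j] = dp[i-1][j-1]
--                 else:
--                     dp[i][j] = 1 + min(dp[i-1][j], dp[i][j-1], dp[i-1][j-1])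
--
--     return dp[n][m]
-- ===== SOURCE B (Python) =====
-- def edr(s, t, k):
--     """Расстояние EDR (top-down memoized recursion over the index pair)."""
--     memo = {}
--
--     def rec(i, j):
--         if i == 0:
--             return j
--         if j == 0:
--             return i
--         if (i, j) in memo:
--             return memo[(i, j)]
--         if abs(s[i - 1] - t[j - 1]) <= k:
--             v = rec(i - 1, j - 1)
--         else:
--             v = 1 + min(rec(i - 1, j), rec(i, j - 1), rec(i - 1, j - 1))
--         memo[(i, j)] = v
--         return v
--
--     return rec(len(s), len(t))
-- ===== Notes on version B (the rewrite author's own statement) =====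
-- stated objective: alternative
-- what changed: Replaces A's bottom-up 2D DP table filled by two nested loops with a top-down memoized recursion rec(i, j) over the index pair, caching results in a dict.
import Mathlib
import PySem

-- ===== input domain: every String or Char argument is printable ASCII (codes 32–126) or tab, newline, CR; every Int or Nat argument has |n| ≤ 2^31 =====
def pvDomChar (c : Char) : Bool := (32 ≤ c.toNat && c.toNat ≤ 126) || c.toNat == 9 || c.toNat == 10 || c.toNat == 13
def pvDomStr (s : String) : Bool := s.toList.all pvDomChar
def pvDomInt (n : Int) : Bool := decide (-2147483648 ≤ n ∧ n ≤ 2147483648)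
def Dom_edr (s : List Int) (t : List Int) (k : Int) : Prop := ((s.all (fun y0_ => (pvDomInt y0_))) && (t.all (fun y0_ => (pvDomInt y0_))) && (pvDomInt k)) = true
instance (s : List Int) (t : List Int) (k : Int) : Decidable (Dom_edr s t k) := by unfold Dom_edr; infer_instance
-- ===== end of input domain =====

-- B replaces A's bottom-up 2D table with a top-down memoized recursion over the index pair (same values; not faster).

-- ===== PORT A =====
-- table read dp[i][j]; every access in A is in range, so getD with default is exact
def edrGet (dp : List (List Int)) (i j : Nat) : Int := (dp.getD i []).getD j 0

-- body of A's inner loop: the assignment dp[i][j] = …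
def edrStep (s t : List Int) (k : Int) (i j : Nat) (dp : List (List Int)) : List (List Int) :=
  let v : Int :=
    if i = 0 then (j : Int)
    else if j = 0 then (i : Int)
    else if |s.getD (i-1) 0 - t.getD (j-1) 0| ≤ k then edrGet dp (i-1) (j-1)
    else 1 + min (edrGet dp (i-1) j) (min (edrGet dp i (j-1)) (edrGet dp (i-1) (j-1)))
  dp.set i ((dp.getD i []).set j v)

-- literal port of A: build the (n+1)×(m+1) zero table, fill it with the two nested loops
-- (range(x) over the Nat indices 0..x-1 is List.range x), return dp[n][m]
def edr (s : List Int) (t : List Int) (k : Int) : Int :=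
  let n := s.length
  let m := t.length
  let dp0 := (List.range (n+1)).map (fun _ => (List.range (m+1)).map (fun _ => (0 : Int)))
  let dp := (List.range (n+1)).foldl
    (fun dp i => (List.range (m+1)).foldl (fun dp j => edrStep s t k i j dp) dp) dp0
  edrGet dp n m

-- ===== PORT B =====
-- rec(i, j) with the memo dict threaded through (Python's closure-mutated dict)
def edrRec (s t : List Int) (k : Int) :
    Nat → Nat → PySem.Dict (Nat × Nat) Int → Int × PySem.Dict (Nat × Nat) Int
  | 0, j, memo => ((j : Int), memo)
  | i+1, 0, memo => ((i : Int) + 1, memo)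
  | i+1, j+1, memo =>
    match memo.get? (i+1, j+1) with
    | some v => (v, memo)
    | none =>
      if |s.getD i 0 - t.getD j 0| ≤ k then
        let r := edrRec s t k i j memo
        (r.1, r.2.insert (i+1, j+1) r.1)
      else
        let r1 := edrRec s t k i (j+1) memo
        let r2 := edrRec s t k (i+1) j r1.2
        let r3 := edrRec s t k i j r2.2
        let v := 1 + min r1.1 (min r2.1 r3.1)
        (v, r3.2.insert (i+1, j+1) v)
  termination_by i j _ => i + j

def edr_alt (s : List Int) (t : List Int) (k : Int) : Int :=
  (edrRec s t k s.length t.length PySem.Dict.empty).1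

-- ===== PRECONDITION & SPEC =====
def Spec_edr (s : List Int) (t : List Int) (k : Int) (out : Int) : Prop := out = edr_alt s t k
instance (s : List Int) (t : List Int) (k : Int) (out : Int) : Decidable (Spec_edr s t k out) := by unfold Spec_edr; infer_instance

-- ===== CLAIM (what is proved, stated in full; the proofs are below) =====
def Claim_equal_edr : Prop := ∀ (s : List Int) (t : List Int) (k : Int), Dom_edr s t k → Spec_edr s t k (edr s t k)

-- ===== LEMMAS AND PROOFS =====

-- the mathematical EDR recurrence both programs compute
def F (s t : List Int) (k : Int) : Nat → Nat → Int
  | 0, j => (j : Int)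
  | i+1, 0 => (i : Int) + 1
  | i+1, j+1 =>
    if |s.getD i 0 - t.getD j 0| ≤ k then F s t k i j
    else 1 + min (F s t k i (j+1)) (min (F s t k (i+1) j) (F s t k i j))
  termination_by i j => i + j

-- B-side: the memo invariant and correctness of the memoized recursion
def MemoInv (s t : List Int) (k : Int) (memo : PySem.Dict (Nat × Nat) Int) : Prop :=
  ∀ a b v, memo.get? (a, b) = some v → v = F s t k a b

lemma edrRec_correct (s t : List Int) (k : Int) :
    ∀ i j memo, MemoInv s t k memo →
      (edrRec s t k i j memo).1 = F s t k i j ∧ MemoInv s t k (edrRec s t k i j memo).2 := by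
  intro i j memo hm
  induction i, j, memo using edrRec.induct s t k with
  | case1 j memo => simpa [edrRec, F] using hm
  | case2 i memo => simpa [edrRec, F] using hm
  | case3 i j memo v hv =>
    rw [edrRec]
    simp only [hv]
    exact ⟨(hm _ _ _ hv).symm ▸ rfl, hm⟩
  | case4 i j memo hv hle ih =>
    rw [edrRec]
    simp only [hv, if_pos hle]
    obtain ⟨h1, h2⟩ := ih hm
    have hF : F s t k (i+1) (j+1) = F s t k i j := by rw [F, if_pos hle]
    refine ⟨hF ▸ h1, ?_⟩
    intro a b w hw
    rw [PySem.Dict.get?_insert] at hw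
    split at hw
    · rename_i heq
      simp only [Prod.mk.injEq] at heq
      obtain ⟨ha, hb⟩ := heq
      subst ha; subst hb
      simp only [Option.some.injEq] at hw
      rw [← hw, h1, ← hF]
    · exact h2 _ _ _ hw
  | case5 i j memo hv hle _r1 _r2 ih1 ih2 _ ih3 =>
    rw [edrRec]
    simp only [hv, if_neg hle]
    obtain ⟨e1, m1⟩ := ih1 hm
    obtain ⟨e2, m2⟩ := ih2 m1
    obtain ⟨e3, m3⟩ := ih3 m2
    refine ⟨by rw [e1, e2, e3, F, if_neg hle], ?_⟩
    intro a b w hw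
    rw [PySem.Dict.get?_insert] at hw
    split at hw
    · rename_i heq
      simp only [Prod.mk.injEq] at heq
      obtain ⟨ha, hb⟩ := heq
      subst ha; subst hb
      simp only [Option.some.injEq] at hw
      rw [← hw, e1, e2, e3, F, if_neg hle]
    · exact m3 _ _ _ hw

lemma getD_set_ne {α : Type} (l : List α) (i a : Nat) (x d : α) (h : a ≠ i) :
    (l.set i x).getD a d = l.getD a d := by
  simp [List.getD_eq_getElem?_getD, List.getElem?_set_ne (Ne.symm h)]

lemma getD_set_self {α : Type} (l : List α) (i : Nat) (x d : α) (h : i < l.length) :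
    (l.set i x).getD i d = x := by
  simp [List.getD_eq_getElem?_getD, h]

-- A-side: the inner loop fills row i with F i ·, leaving other rows untouched
lemma inner_loop (s t : List Int) (k : Int) (i : Nat) (hi : i ≤ s.length)
    (dp : List (List Int)) (Hlen : dp.length = s.length + 1)
    (Hrow : ∀ a, a ≤ s.length → (dp.getD a []).length = t.length + 1)
    (Hprev : ∀ a b, a < i → b ≤ t.length → edrGet dp a b = F s t k a b) :
    ∀ c, c ≤ t.length + 1 →
      ((List.range c).foldl (fun dp j => edrStep s t k i j dp) dp).length = s.length + 1 ∧
      (∀ a, a ≤ s.length →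
        (((List.range c).foldl (fun dp j => edrStep s t k i j dp) dp).getD a []).length = t.length + 1) ∧
      (∀ a, a ≠ i →
        ((List.range c).foldl (fun dp j => edrStep s t k i j dp) dp).getD a [] = dp.getD a []) ∧
      (∀ b, b < c → edrGet ((List.range c).foldl (fun dp j => edrStep s t k i j dp) dp) i b = F s t k i b) := by
  intro c
  induction c with
  | zero => exact fun _ => ⟨Hlen, Hrow, fun _ _ => rfl, fun b hb => absurd hb (by omega)⟩
  | succ c ih =>
    intro hc
    obtain ⟨L, R, U, C⟩ := ih (by omega)
    have hj : c ≤ t.length := by omega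
    rw [List.range_succ, List.foldl_append]
    set dp' := (List.range c).foldl (fun dp j => edrStep s t k i j dp) dp with hdp'
    simp only [List.foldl_cons, List.foldl_nil]
    have hilen : i < dp'.length := by omega
    have hrowlen : (dp'.getD i []).length = t.length + 1 := R i hi
    -- the value written at (i, c) is F i c
    have hval : (if i = 0 then (c : Int)
        else if c = 0 then (i : Int)
        else if |s.getD (i-1) 0 - t.getD (c-1) 0| ≤ k then edrGet dp' (i-1) (c-1)
        else 1 + min (edrGet dp' (i-1) c) (min (edrGet dp' i (c-1)) (edrGet dp' (i-1) (c-1))))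
        = F s t k i c := by
      rcases Nat.eq_zero_or_pos i with hi0 | hipos
      · subst hi0; simp [F]
      · obtain ⟨a, rfl⟩ : ∃ a, i = a + 1 := ⟨i - 1, by omega⟩
        rcases Nat.eq_zero_or_pos c with hc0 | hcpos
        · subst hc0; simp [F]
        · obtain ⟨b, rfl⟩ : ∃ b, c = b + 1 := ⟨c - 1, by omega⟩
          have prevRow : ∀ b', b' ≤ t.length → edrGet dp' a b' = F s t k a b' := by
            intro b' hb'
            show (dp'.getD a []).getD b' 0 = _
            rw [U a (by omega)]
            exact Hprev a b' (by omega) hb'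
          simp only [Nat.add_sub_cancel, if_neg (Nat.succ_ne_zero a), if_neg (Nat.succ_ne_zero b)]
          rw [F]
          by_cases hk : |s.getD a 0 - t.getD b 0| ≤ k
          · rw [if_pos hk, if_pos hk]
            exact prevRow b (by omega)
          · rw [if_neg hk, if_neg hk]
            rw [prevRow (b+1) (by omega), prevRow b (by omega), C b (by omega)]
    -- effect of the single step
    refine ⟨?_, ?_, ?_, ?_⟩
    · show (dp'.set i _).length = _
      rw [List.length_set]; exact L
    · intro a ha
      show ((dp'.set i _).getD a []).length = _
      by_cases hai : a = i
      · subst hai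
        rw [getD_set_self _ _ _ _ hilen, List.length_set]
        exact R a ha
      · rw [getD_set_ne _ _ _ _ _ hai]; exact R a ha
    · intro a ha
      show (dp'.set i _).getD a [] = _
      rw [getD_set_ne _ _ _ _ _ ha]
      exact U a ha
    · intro b hb
      show ((dp'.set i _).getD i []).getD b 0 = _
      rw [getD_set_self _ _ _ _ hilen]
      by_cases hbc : b = c
      · subst hbc
        rw [getD_set_self _ _ _ _ (by omega)]
        exact hval
      · rw [getD_set_ne _ _ _ _ _ hbc]
        exact C b (by omega)

lemma outer_loop (s t : List Int) (k : Int)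
    (dp : List (List Int)) (Hlen : dp.length = s.length + 1)
    (Hrow : ∀ a, a ≤ s.length → (dp.getD a []).length = t.length + 1) :
    ∀ r, r ≤ s.length + 1 →
      ((List.range r).foldl
        (fun dp i => (List.range (t.length+1)).foldl (fun dp j => edrStep s t k i j dp) dp) dp).length = s.length + 1 ∧
      (∀ a, a ≤ s.length →
        (((List.range r).foldl
          (fun dp i => (List.range (t.length+1)).foldl (fun dp j => edrStep s t k i j dp) dp) dp).getD a []).length = t.length + 1) ∧
      (∀ a b, a < r → b ≤ t.length →
        edrGet ((List.range r).foldl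
          (fun dp i => (List.range (t.length+1)).foldl (fun dp j => edrStep s t k i j dp) dp) dp) a b = F s t k a b) := by
  intro r
  induction r with
  | zero => exact fun _ => ⟨Hlen, Hrow, fun a b ha _ => absurd ha (by omega)⟩
  | succ r ih =>
    intro hr
    obtain ⟨L, R, P⟩ := ih (by omega)
    rw [show List.range (r+1) = List.range r ++ [r] from List.range_succ, List.foldl_append]
    set dp' := (List.range r).foldl
      (fun dp i => (List.range (t.length+1)).foldl (fun dp j => edrStep s t k i j dp) dp) dp with hdp'
    simp only [List.foldl_cons, List.foldl_nil]
    obtain ⟨L', R', U', C'⟩ :=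
      inner_loop s t k r (by omega) dp' L R (fun a b ha hb => P a b ha hb) (t.length + 1) (le_refl _)
    refine ⟨L', R', ?_⟩
    intro a b ha hb
    by_cases har : a = r
    · subst har
      exact C' b (by omega)
    · show ((_ : List (List Int)).getD a []).getD b 0 = _
      rw [U' a har]
      exact P a b (by omega) hb

lemma edr_eq_F (s t : List Int) (k : Int) : edr s t k = F s t k s.length t.length := by
  unfold edr
  have hlen0 : ((List.range (s.length+1)).map
      (fun _ => (List.range (t.length+1)).map (fun _ => (0 : Int)))).length = s.length + 1 := by
    simp
  have hrow0 : ∀ a, a ≤ s.length →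
      (((List.range (s.length+1)).map
        (fun _ => (List.range (t.length+1)).map (fun _ => (0 : Int)))).getD a []).length = t.length + 1 := by
    intro a ha
    rw [List.getD_eq_getElem?_getD, List.getElem?_map, List.getElem?_range (by omega)]
    simp
  obtain ⟨_, _, P⟩ := outer_loop s t k _ hlen0 hrow0 (s.length + 1) (le_refl _)
  exact P s.length t.length (by omega) (le_refl _)

lemma edr_alt_eq_F (s t : List Int) (k : Int) : edr_alt s t k = F s t k s.length t.length := by
  unfold edr_alt
  exact (edrRec_correct s t k s.length t.length PySem.Dict.empty
    (fun a b v h => by simp [PySem.Dict.get?_empty] at h)).1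

-- ===== VERDICT (by name: the statement is the Claim_ definition above) =====
theorem edr_spec : Claim_equal_edr := by
  intro s t k _
  unfold Spec_edr
  rw [edr_eq_F, edr_alt_eq_F]
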